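-- pv_equiv track=rewrite | github.com/VanJoyce/Algorithms-Data-Structures-and-Basic-Programs | reversi.py | enclosing
-- ===== SOURCE A (Python) =====
-- def enclosing(board, player, pos, direct):
--     r = pos[0]; c = pos[1]
--     dr = direct[0]; dc = direct[1]
--     i = r + 2*dr; j = c + 2*dc      #position counter for current player's stone
--     m = r + dr; n = c + dc          #position counter for other player's stone
--     stones = 0
--     while 0 <= i < 8 and 0 <= j < 8:
--         if board[i][j] == player:
--             while i < m < r or r < m < i or j < n < c or c < n < j:
--                 if board[m][n] != player and board[m][n] != 0:
--                     stones += 1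
--                     m += dr
--                     n += dc
--                 else :
--                     return False
--             if stones == abs(i - r) - 1 or stones == abs(j - c) - 1:
--                 return True
--             else :
--                 return False
--         else :
--             i += dr
--             j += dc
--     return False
-- ===== SOURCE B (Python) =====
-- def enclosing(board, player, pos, direct):
--     # single linear scan with a seen-opponent flag instead of A's outward search plus recount
--     i = pos[0] + direct[0]
--     j = pos[1] + direct[1]
--     seen_opponent = False
--     while 0 <= i < 8 and 0 <= j < 8:
--         if board[i][j] == 0:
--             return False
--         if board[i][j] == player:
--             return seen_opponent
--         seen_opponent = True
--         i += direct[0]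
--         j += direct[1]
--     return False
-- ===== Notes on version B (the rewrite author's own statement) =====
-- stated objective: simpler
-- what changed: A searches outward from distance 2 for the player's stone and then re-walks the enclosed segment counting stones; B is one linear scan from distance 1 with a seen-opponent flag, no second walk and no counting.
-- outside the precondition, e.g. on enclosing([[0], [0], [2], [0], [1], [0], [0], [0]], 1, (0, 0), (2, 0)): A returns False, B returns True; on enclosing([[0], [0], [0], [1], [0], [0], [0], [0]], 1, (3, 0), (0, 0)): A returns False, B returns False; on enclosing([[0], [2], [0], [0], [0], [0], [0], [0]], 0, (0, 0), (1, 0)): A returns True, B returns False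
import Mathlib
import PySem

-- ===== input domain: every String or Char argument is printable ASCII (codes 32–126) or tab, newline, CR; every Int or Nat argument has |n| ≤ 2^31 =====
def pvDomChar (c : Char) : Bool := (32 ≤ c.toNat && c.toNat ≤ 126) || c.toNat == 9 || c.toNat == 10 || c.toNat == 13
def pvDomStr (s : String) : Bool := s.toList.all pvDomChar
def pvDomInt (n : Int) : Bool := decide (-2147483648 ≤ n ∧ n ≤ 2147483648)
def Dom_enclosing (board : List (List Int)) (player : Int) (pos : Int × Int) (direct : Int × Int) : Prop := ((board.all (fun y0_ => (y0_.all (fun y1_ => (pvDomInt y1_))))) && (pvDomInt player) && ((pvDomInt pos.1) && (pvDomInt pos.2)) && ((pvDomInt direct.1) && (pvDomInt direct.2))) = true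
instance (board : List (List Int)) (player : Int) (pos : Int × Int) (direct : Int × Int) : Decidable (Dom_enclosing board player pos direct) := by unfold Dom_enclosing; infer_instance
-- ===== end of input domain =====

-- B replaces A's outward search plus enclosed-segment recount by one linear scan with a
-- seen-opponent flag (objective: simpler; same return value on all of Pre_).

-- ===== PORT A =====

-- board[i][j]; exact under Pre_, where every index actually evaluated is in range
def pvCell (board : List (List Int)) (i j : Int) : Int :=
  (PySem.List.pyGet? ((PySem.List.pyGet? board i).getD []) j).getD 0

-- the inner 'while i < m < r or …' loop of A; fuel only makes the recursion total,
-- under Pre_ it is never exhausted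
def pvInnerA : Nat → List (List Int) → Int → Int → Int → Int → Int → Int → Int → Int → Int → Int → Bool
  | 0, _, _, _, _, _, _, _, _, _, _, _ => false
  | (fuel+1), board, player, r, c, dr, dc, i, j, m, n, stones =>
    if (i < m ∧ m < r) ∨ (r < m ∧ m < i) ∨ (j < n ∧ n < c) ∨ (c < n ∧ n < j) then
      if pvCell board m n ≠ player ∧ pvCell board m n ≠ 0 then
        pvInnerA fuel board player r c dr dc i j (m + dr) (n + dc) (stones + 1)
      else false
    else
      decide (stones = ((i - r).natAbs : Int) - 1 ∨ stones = ((j - c).natAbs : Int) - 1)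

-- the outer 'while 0 <= i < 8 and 0 <= j < 8' loop of A
def pvOuterA : Nat → List (List Int) → Int → Int → Int → Int → Int → Int → Int → Int → Int → Int → Bool
  | 0, _, _, _, _, _, _, _, _, _, _, _ => false
  | (fuel+1), board, player, r, c, dr, dc, i, j, m, n, stones =>
    if 0 ≤ i ∧ i < 8 ∧ 0 ≤ j ∧ j < 8 then
      if pvCell board i j = player then
        pvInnerA 32 board player r c dr dc i j m n stones
      else
        pvOuterA fuel board player r c dr dc (i + dr) (j + dc) m n stones
    else false

def enclosing (board : List (List Int)) (player : Int) (pos : Int × Int) (direct : Int × Int) : Bool :=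
  pvOuterA 32 board player pos.1 pos.2 direct.1 direct.2
    (pos.1 + 2*direct.1) (pos.2 + 2*direct.2) (pos.1 + direct.1) (pos.2 + direct.2) 0

-- ===== PORT B =====

-- B's single 'while on board' scan carrying the seen_opponent flag
def pvScanB : Nat → List (List Int) → Int → Int → Int → Int → Int → Bool → Bool
  | 0, _, _, _, _, _, _, _ => false
  | (fuel+1), board, player, dr, dc, i, j, seen =>
    if 0 ≤ i ∧ i < 8 ∧ 0 ≤ j ∧ j < 8 then
      if pvCell board i j = 0 then false
      else if pvCell board i j = player then seen
      else pvScanB fuel board player dr dc (i + dr) (j + dc) true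
    else false

def enclosing_alt (board : List (List Int)) (player : Int) (pos : Int × Int) (direct : Int × Int) : Bool :=
  pvScanB 32 board player direct.1 direct.2 (pos.1 + direct.1) (pos.2 + direct.2) false

-- ===== PRECONDITION & SPEC =====
-- Pre_ admits (a) the function's natural domain — a board with at least 8 rows of at least 8
-- cells, an on-board pos, one of the eight unit directions, a non-zero player colour — and
-- (b) any call whose two start cells pos+direct and pos+2*direct both lie off the 8×8 board
-- (both programs return False at once there, touching nothing).  Outside these, A may raise
-- IndexError (short rows), loop forever (zero direction with no own stone ahead), read cells
-- through Python's negative-index wraparound (off-board pos), or produce values on meaningless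
-- calls (player 0 = the empty marker, non-unit direction vectors) that no caller specifies —
-- see claim.json "cites" for excluded examples.
def Pre_enclosing (board : List (List Int)) (player : Int) (pos : Int × Int) (direct : Int × Int) : Prop :=
  (8 ≤ board.length ∧ (∀ row ∈ board, 8 ≤ row.length) ∧ player ≠ 0 ∧
   0 ≤ pos.1 ∧ pos.1 < 8 ∧ 0 ≤ pos.2 ∧ pos.2 < 8 ∧
   (direct.1 = -1 ∨ direct.1 = 0 ∨ direct.1 = 1) ∧
   (direct.2 = -1 ∨ direct.2 = 0 ∨ direct.2 = 1) ∧
   ¬(direct.1 = 0 ∧ direct.2 = 0)) ∨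
  (¬(0 ≤ pos.1 + direct.1 ∧ pos.1 + direct.1 < 8 ∧ 0 ≤ pos.2 + direct.2 ∧ pos.2 + direct.2 < 8) ∧
   ¬(0 ≤ pos.1 + 2*direct.1 ∧ pos.1 + 2*direct.1 < 8 ∧ 0 ≤ pos.2 + 2*direct.2 ∧ pos.2 + 2*direct.2 < 8))
instance (board : List (List Int)) (player : Int) (pos : Int × Int) (direct : Int × Int) : Decidable (Pre_enclosing board player pos direct) := by unfold Pre_enclosing; infer_instance

def pvWitness_enclosing : List (List Int) × Int × (Int × Int) × (Int × Int) :=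
  (List.replicate 8 (List.replicate 8 0), 1, (3, 3), (1, 0))

def Spec_enclosing (board : List (List Int)) (player : Int) (pos : Int × Int) (direct : Int × Int) (out : Bool) : Prop := out = enclosing_alt board player pos direct
instance (board : List (List Int)) (player : Int) (pos : Int × Int) (direct : Int × Int) (out : Bool) : Decidable (Spec_enclosing board player pos direct out) := by unfold Spec_enclosing; infer_instance

-- ===== CLAIM (what is proved, stated in full; the proofs are below) =====
def Claim_equal_enclosing : Prop := ∀ (board : List (List Int)) (player : Int) (pos : Int × Int) (direct : Int × Int), Dom_enclosing board player pos direct → Pre_enclosing board player pos direct → Spec_enclosing board player pos direct (enclosing board player pos direct)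

-- ===== LEMMAS AND PROOFS =====

-- the side conditions all lemmas share: unit non-zero direction, on-board pos
def pvOK (r c dr dc : Int) : Prop :=
  (dr = -1 ∨ dr = 0 ∨ dr = 1) ∧ (dc = -1 ∨ dc = 0 ∨ dc = 1) ∧ ¬(dr = 0 ∧ dc = 0) ∧
  0 ≤ r ∧ r < 8 ∧ 0 ≤ c ∧ c < 8

lemma pv_offboard (r c dr dc k : Int) (h : pvOK r c dr dc) (hk : 8 ≤ k) :
    ¬(0 ≤ r + k*dr ∧ r + k*dr < 8 ∧ 0 ≤ c + k*dc ∧ c + k*dc < 8) := by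
  obtain ⟨hdr, hdc, hnz, h1, h2, h3, h4⟩ := h
  rcases hdr with h | h | h <;> rcases hdc with h' | h' | h' <;> subst h <;> subst h' <;>
    first
    | exact absurd ⟨rfl, rfl⟩ hnz
    | omega

lemma pv_onboard_le (r c dr dc k : Int) (h : pvOK r c dr dc)
    (hb : 0 ≤ r + k*dr ∧ r + k*dr < 8 ∧ 0 ≤ c + k*dc ∧ c + k*dc < 8) : k ≤ 7 := by
  by_contra hk
  exact pv_offboard r c dr dc k h (by omega) hb

lemma pv_cond_iff (r c dr dc t k : Int) (h : pvOK r c dr dc) (ht : 1 ≤ t) :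
    ((r + k*dr < r + t*dr ∧ r + t*dr < r) ∨ (r < r + t*dr ∧ r + t*dr < r + k*dr) ∨
     (c + k*dc < c + t*dc ∧ c + t*dc < c) ∨ (c < c + t*dc ∧ c + t*dc < c + k*dc))
    ↔ t < k := by
  obtain ⟨hdr, hdc, hnz, _⟩ := h
  rcases hdr with h | h | h <;> rcases hdc with h' | h' | h' <;> subst h <;> subst h' <;>
    first
    | exact absurd ⟨rfl, rfl⟩ hnz
    | omega

-- the inner loop returns True when it walks opponents from step t up to the player stone at step k
lemma pv_innerA_true (board : List (List Int)) (player r c dr dc : Int) (h : pvOK r c dr dc)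
    (k : Int) (hk2 : 2 ≤ k) (hk7 : k ≤ 7) :
    ∀ fuel : Nat, ∀ t : Int, 1 ≤ t → t ≤ k → 9 ≤ t + fuel →
    (∀ s : Int, t ≤ s → s < k →
      pvCell board (r + s*dr) (c + s*dc) ≠ player ∧ pvCell board (r + s*dr) (c + s*dc) ≠ 0) →
    pvInnerA fuel board player r c dr dc (r + k*dr) (c + k*dc) (r + t*dr) (c + t*dc) (t - 1) = true := by
  intro fuel
  induction fuel with
  | zero => intro t ht1 htk h9 _; omega
  | succ f ih =>
    intro t ht1 htk h9 hpre
    by_cases hlt : t < k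
    · rw [pvInnerA, if_pos ((pv_cond_iff r c dr dc t k h ht1).mpr hlt),
        if_pos (hpre t le_rfl hlt)]
      have e1 : r + t*dr + dr = r + (t+1)*dr := by ring
      have e2 : c + t*dc + dc = c + (t+1)*dc := by ring
      have e3 : t - 1 + 1 = (t+1) - 1 := by ring
      rw [e1, e2, e3]
      exact ih (t+1) (by omega) (by omega) (by omega)
        (fun s hs1 hs2 => hpre s (by omega) hs2)
    · have ht : t = k := by omega
      subst ht
      rw [pvInnerA, if_neg (fun hc => absurd ((pv_cond_iff r c dr dc t t h ht1).mp hc) (by omega)),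
        decide_eq_true_eq]
      obtain ⟨hdr, hdc, hnz, _⟩ := h
      rcases hdr with hd | hd | hd <;> rcases hdc with hd' | hd' | hd' <;> subst hd <;> subst hd' <;>
        first
        | exact absurd ⟨rfl, rfl⟩ hnz
        | omega

-- the inner loop returns False when the walk meets an empty or own cell at step t0 < k
lemma pv_innerA_false (board : List (List Int)) (player r c dr dc : Int) (h : pvOK r c dr dc)
    (k t0 : Int) (ht01 : 1 ≤ t0) (ht0k : t0 < k) (hk : k ≤ 8)
    (hbad : pvCell board (r + t0*dr) (c + t0*dc) = 0 ∨ pvCell board (r + t0*dr) (c + t0*dc) = player) :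
    ∀ fuel : Nat, ∀ t : Int, 1 ≤ t → t ≤ t0 → 9 ≤ t + fuel →
    (∀ s : Int, t ≤ s → s < t0 →
      pvCell board (r + s*dr) (c + s*dc) ≠ player ∧ pvCell board (r + s*dr) (c + s*dc) ≠ 0) →
    ∀ stones : Int,
    pvInnerA fuel board player r c dr dc (r + k*dr) (c + k*dc) (r + t*dr) (c + t*dc) stones = false := by
  intro fuel
  induction fuel with
  | zero => intro t ht1 htt0 h9 _ _; omega
  | succ f ih =>
    intro t ht1 htt0 h9 hpre stones
    rw [pvInnerA, if_pos ((pv_cond_iff r c dr dc t k h ht1).mpr (by omega))]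
    by_cases heq : t = t0
    · subst heq
      rw [if_neg]
      rcases hbad with hb | hb
      · exact fun hc => hc.2 hb
      · exact fun hc => hc.1 hb
    · rw [if_pos (hpre t le_rfl (by omega))]
      have e1 : r + t*dr + dr = r + (t+1)*dr := by ring
      have e2 : c + t*dc + dc = c + (t+1)*dc := by ring
      rw [e1, e2]
      exact ih (t+1) (by omega) (by omega) (by omega)
        (fun s hs1 hs2 => hpre s (by omega) hs2) (stones + 1)

-- once an empty or own cell sits at step t0 behind the scan front, A's outer loop can only return False
lemma pv_outerA_false (board : List (List Int)) (player r c dr dc : Int) (h : pvOK r c dr dc)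
    (t0 : Int) (ht01 : 1 ≤ t0)
    (hbad : pvCell board (r + t0*dr) (c + t0*dc) = 0 ∨ pvCell board (r + t0*dr) (c + t0*dc) = player)
    (hpre : ∀ s : Int, 1 ≤ s → s < t0 →
      pvCell board (r + s*dr) (c + s*dc) ≠ player ∧ pvCell board (r + s*dr) (c + s*dc) ≠ 0) :
    ∀ fuel : Nat, ∀ k : Int, t0 < k → 9 ≤ k + fuel →
    pvOuterA fuel board player r c dr dc (r + k*dr) (c + k*dc) (r + dr) (c + dc) 0 = false := by
  intro fuel
  induction fuel with
  | zero => intro k _ _; rfl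
  | succ f ih =>
    intro k htk h9
    by_cases hb : 0 ≤ r + k*dr ∧ r + k*dr < 8 ∧ 0 ≤ c + k*dc ∧ c + k*dc < 8
    · have hk7 := pv_onboard_le r c dr dc k h hb
      rw [pvOuterA, if_pos hb]
      by_cases hcell : pvCell board (r + k*dr) (c + k*dc) = player
      · rw [if_pos hcell]
        have e1 : r + dr = r + 1*dr := by ring
        have e2 : c + dc = c + 1*dc := by ring
        rw [e1, e2]
        exact pv_innerA_false board player r c dr dc h k t0 ht01 htk (by omega) hbad
          32 1 le_rfl ht01 (by omega) (fun s hs1 hs2 => hpre s hs1 hs2) 0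
      · rw [if_neg hcell]
        have e1 : r + k*dr + dr = r + (k+1)*dr := by ring
        have e2 : c + k*dc + dc = c + (k+1)*dc := by ring
        rw [e1, e2]
        exact ih (k+1) (by omega) (by omega)
    · rw [pvOuterA, if_neg hb]

-- main bisimulation: while every step before k is an opponent, A's outer loop at step k
-- computes the same answer as B's scan at step k with seen_opponent = True
lemma pv_outer_scan (board : List (List Int)) (player r c dr dc : Int) (h : pvOK r c dr dc)
    (hp : player ≠ 0) :
    ∀ fuelA fuelB : Nat, ∀ k : Int, 2 ≤ k → 9 ≤ k + fuelA → 9 ≤ k + fuelB →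
    (∀ s : Int, 1 ≤ s → s < k →
      pvCell board (r + s*dr) (c + s*dc) ≠ player ∧ pvCell board (r + s*dr) (c + s*dc) ≠ 0) →
    pvOuterA fuelA board player r c dr dc (r + k*dr) (c + k*dc) (r + dr) (c + dc) 0
      = pvScanB fuelB board player dr dc (r + k*dr) (c + k*dc) true := by
  intro fuelA
  induction fuelA with
  | zero =>
    intro fuelB k hk2 h9A h9B hpre
    have hoff := pv_offboard r c dr dc k h (by omega)
    rcases fuelB with _ | fB
    · rfl
    · rw [pvScanB, if_neg hoff]; rfl
  | succ fA ih =>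
    intro fuelB k hk2 h9A h9B hpre
    by_cases hb : 0 ≤ r + k*dr ∧ r + k*dr < 8 ∧ 0 ≤ c + k*dc ∧ c + k*dc < 8
    · have hk7 := pv_onboard_le r c dr dc k h hb
      rcases fuelB with _ | fB
      · omega
      · rw [pvOuterA, pvScanB, if_pos hb, if_pos hb]
        by_cases h0 : pvCell board (r + k*dr) (c + k*dc) = 0
        · rw [if_pos h0, if_neg (fun hc => hp (by rw [hc] at h0; exact h0))]
          have e1 : r + k*dr + dr = r + (k+1)*dr := by ring
          have e2 : c + k*dc + dc = c + (k+1)*dc := by ring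
          rw [e1, e2]
          exact pv_outerA_false board player r c dr dc h k (by omega) (Or.inl h0)
            (fun s hs1 hs2 => hpre s hs1 hs2) fA (k+1) (by omega) (by omega)
        · rw [if_neg h0]
          by_cases hpl : pvCell board (r + k*dr) (c + k*dc) = player
          · rw [if_pos hpl, if_pos hpl]
            have e1 : r + dr = r + 1*dr := by ring
            have e2 : c + dc = c + 1*dc := by ring
            have e3 : (0:Int) = 1 - 1 := by norm_num
            rw [e1, e2, e3]
            exact pv_innerA_true board player r c dr dc h k hk2 hk7 32 1 le_rfl (by omega)
              (by omega) (fun s hs1 hs2 => hpre s hs1 hs2)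
          · rw [if_neg hpl, if_neg hpl]
            have e1 : r + k*dr + dr = r + (k+1)*dr := by ring
            have e2 : c + k*dc + dc = c + (k+1)*dc := by ring
            rw [e1, e2]
            exact ih fB (k+1) (by omega) (by omega) (by omega)
              (fun s hs1 hs2 => by
                by_cases hsk : s < k
                · exact hpre s hs1 hsk
                · have hsk' : s = k := by omega
                  subst hsk'
                  exact ⟨hpl, h0⟩)
    · rcases fuelB with _ | fB
      · rw [pvOuterA, if_neg hb]; rfl
      · rw [pvOuterA, pvScanB, if_neg hb, if_neg hb]

-- ===== VERDICT (by name: the statement is the Claim_ definition above) =====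
theorem enclosing_spec : Claim_equal_enclosing := by
  unfold Claim_equal_enclosing Spec_enclosing
  intro board player pos direct _ hPre
  obtain ⟨pr, pc⟩ := pos
  obtain ⟨pdr, pdc⟩ := direct
  rcases hPre with hPre | ⟨hoffB, hoffA⟩
  case inr =>
    show pvOuterA 32 board player pr pc pdr pdc (pr + 2*pdr) (pc + 2*pdc) (pr + pdr) (pc + pdc) 0
        = pvScanB 32 board player pdr pdc (pr + pdr) (pc + pdc) false
    rw [(rfl : (32:Nat) = 31+1), pvOuterA, pvScanB, if_neg hoffA, if_neg hoffB]
  obtain ⟨_, _, hp, h1, h2, h3, h4, hdr, hdc, hnz⟩ := hPre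
  have hOK : pvOK pr pc pdr pdc := ⟨hdr, hdc, hnz, h1, h2, h3, h4⟩
  show pvOuterA 32 board player pr pc pdr pdc (pr + 2*pdr) (pc + 2*pdc) (pr + pdr) (pc + pdc) 0
      = pvScanB 32 board player pdr pdc (pr + pdr) (pc + pdc) false
  have h32 : (32:Nat) = 31+1 := rfl
  by_cases hb1 : 0 ≤ pr + pdr ∧ pr + pdr < 8 ∧ 0 ≤ pc + pdc ∧ pc + pdc < 8
  · rw [h32, pvScanB, if_pos hb1]
    by_cases h0 : pvCell board (pr + pdr) (pc + pdc) = 0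
    · rw [if_pos h0]
      rw [(by ring : pr + pdr = pr + 1*pdr), (by ring : pc + pdc = pc + 1*pdc)] at h0
      exact pv_outerA_false board player pr pc pdr pdc hOK 1 le_rfl (Or.inl h0)
        (fun s hs1 hs2 => absurd hs2 (by omega)) (31+1) 2 (by omega) (by omega)
    · by_cases hpl : pvCell board (pr + pdr) (pc + pdc) = player
      · rw [if_neg h0, if_pos hpl]
        rw [(by ring : pr + pdr = pr + 1*pdr), (by ring : pc + pdc = pc + 1*pdc)] at hpl
        exact pv_outerA_false board player pr pc pdr pdc hOK 1 le_rfl (Or.inr hpl)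
          (fun s hs1 hs2 => absurd hs2 (by omega)) (31+1) 2 (by omega) (by omega)
      · rw [if_neg h0, if_neg hpl]
        rw [(by ring : pr + pdr + pdr = pr + 2*pdr), (by ring : pc + pdc + pdc = pc + 2*pdc)]
        rw [(by ring : pr + pdr = pr + 1*pdr), (by ring : pc + pdc = pc + 1*pdc)] at h0 hpl
        exact pv_outer_scan board player pr pc pdr pdc hOK hp (31+1) 31 2 (by omega) (by omega)
          (by omega)
          (fun s hs1 hs2 => by
            have hs : s = 1 := by omega
            subst hs
            exact ⟨hpl, h0⟩)
  · have hb2 : ¬(0 ≤ pr + 2*pdr ∧ pr + 2*pdr < 8 ∧ 0 ≤ pc + 2*pdc ∧ pc + 2*pdc < 8) := by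
      obtain ⟨hdr', hdc', hnz', _⟩ := hOK
      rcases hdr' with h | h | h <;> rcases hdc' with h' | h' | h' <;> subst h <;> subst h' <;>
        first
        | exact absurd ⟨rfl, rfl⟩ hnz'
        | omega
    rw [h32, pvOuterA, pvScanB, if_neg hb2, if_neg hb1]
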